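-- pv_equiv track=rewrite | github.com/V1B3hR/adaptiveneuralnetwork | core/decision_transparency.py | _categorize_factor
-- ===== SOURCE A (Python) =====
-- def _categorize_factor(factor_name: str) -> str:
--     """Categorize a factor into a region"""
--     factor_lower = factor_name.lower()
--
--     if any(word in factor_lower for word in ["trust", "confidence", "reliability"]):
--         return "Trust"
--     elif any(word in factor_lower for word in ["energy", "consumption", "efficiency"]):
--         return "Energy"
--     elif any(word in factor_lower for word in ["time", "duration", "processing"]):
--         return "Temporal"
--     elif any(word in factor_lower for word in ["ethics", "compliance", "moral"]):
--         return "Ethics"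
--     elif any(word in factor_lower for word in ["input", "data", "information"]):
--         return "Input"
--     else:
--         return "Other"
-- ===== SOURCE B (Python) =====
-- # Text-driven scan: instead of testing each keyword against the string, walk the
-- # lowered string once, look every substring of keyword-length (4..11 chars) up in a
-- # keyword->priority-rank hash table, keep the minimum rank seen, and map it to its
-- # category (rank 5 = nothing matched = "Other").  The category priority order of the
-- # original if/elif chain is preserved because the minimum matched rank is exactly the
-- # first group of the chain that has a match.
--
-- _KEYWORD_RANK = {
--     "trust": 0, "confidence": 0, "reliability": 0,
--     "energy": 1, "consumption": 1, "efficiency": 1,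
--     "time": 2, "duration": 2, "processing": 2,
--     "ethics": 3, "compliance": 3, "moral": 3,
--     "input": 4, "data": 4, "information": 4,
-- }
--
-- _CATEGORIES = ["Trust", "Energy", "Temporal", "Ethics", "Input", "Other"]
--
--
-- def _categorize_factor(factor_name: str) -> str:
--     s = factor_name.lower()
--     best = 5
--     for i in range(len(s)):
--         # keyword lengths range from 4 to 11; slices clamp at the end of s
--         for j in range(i + 4, i + 12):
--             r = _KEYWORD_RANK.get(s[i:j])
--             if r is not None and r < best:
--                 best = r
--     return _CATEGORIES[best]
-- ===== Notes on version B (the rewrite author's own statement) =====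
-- stated objective: alternative
-- what changed: Instead of testing each keyword list against the string branch by branch, B makes a single text-driven scan: every substring of keyword length (4-11 chars) of the lowered name is looked up in a keyword-to-priority-rank hash map and the minimum rank found indexes the category table (minimum matched rank = first matching branch of A's chain).
import Mathlib
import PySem

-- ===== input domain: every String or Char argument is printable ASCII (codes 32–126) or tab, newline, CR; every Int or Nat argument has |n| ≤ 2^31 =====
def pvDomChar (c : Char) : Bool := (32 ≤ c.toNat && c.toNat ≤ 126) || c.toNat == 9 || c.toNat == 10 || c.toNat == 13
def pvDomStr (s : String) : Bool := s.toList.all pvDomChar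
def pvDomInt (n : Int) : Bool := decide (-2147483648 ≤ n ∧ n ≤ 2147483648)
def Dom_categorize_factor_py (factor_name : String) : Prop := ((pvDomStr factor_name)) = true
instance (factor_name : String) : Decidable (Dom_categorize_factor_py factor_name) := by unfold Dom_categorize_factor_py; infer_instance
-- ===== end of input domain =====

-- B replaces the per-keyword if/elif scan by a single text-driven scan: every substring of
-- keyword length (4..11) of the lowered name is looked up in a keyword→priority-rank hash
-- table and the minimum rank found selects the category (alternative decomposition).

-- ===== PORT A =====
def categorize_factor_py (factor_name : String) : String :=
  let factor_lower := PySem.Str.lower factor_name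
  if ["trust", "confidence", "reliability"].any (fun word => PySem.Str.isIn word factor_lower) then "Trust"
  else if ["energy", "consumption", "efficiency"].any (fun word => PySem.Str.isIn word factor_lower) then "Energy"
  else if ["time", "duration", "processing"].any (fun word => PySem.Str.isIn word factor_lower) then "Temporal"
  else if ["ethics", "compliance", "moral"].any (fun word => PySem.Str.isIn word factor_lower) then "Ethics"
  else if ["input", "data", "information"].any (fun word => PySem.Str.isIn word factor_lower) then "Input"
  else "Other"

-- ===== PORT B =====
-- _KEYWORD_RANK: keyword → priority rank of its category
def kwRank : PySem.Dict String Nat :=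
  PySem.Dict.ofList
  [("trust", 0), ("confidence", 0), ("reliability", 0),
   ("energy", 1), ("consumption", 1), ("efficiency", 1),
   ("time", 2), ("duration", 2), ("processing", 2),
   ("ethics", 3), ("compliance", 3), ("moral", 3),
   ("input", 4), ("data", 4), ("information", 4)]

-- _CATEGORIES
def categoriesB : List String := ["Trust", "Energy", "Temporal", "Ethics", "Input", "Other"]

-- Transliteration notes (each step exact on this port's inputs): s.lower() and the slices are
-- taken on the character list — the Python slice s[i:j] with 0 ≤ i ≤ j is (s.drop i).take (j-i)
-- (both clamp at the end of the string); range(i+4, i+12) is List.range' (i+4) 8; the final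
-- _CATEGORIES[best] is categoriesB.getD best (best starts at 5 and only decreases, so the
-- Python indexing never raises; the default is never used).
def categorize_factor_py_alt (factor_name : String) : String :=
  let s := PySem.Chars.lower factor_name.toList
  let best := (List.range s.length).foldl (fun best i =>
    (List.range' (i + 4) 8).foldl (fun best j =>
      match PySem.Dict.get? kwRank (String.ofList ((s.drop i).take (j - i))) with
      | some r => if r < best then r else best
      | none => best) best) 5
  categoriesB.getD best "Other"

-- ===== PRECONDITION & SPEC =====
def Spec_categorize_factor_py (factor_name : String) (out : String) : Prop := out = categorize_factor_py_alt factor_name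
instance (factor_name : String) (out : String) : Decidable (Spec_categorize_factor_py factor_name out) := by unfold Spec_categorize_factor_py; infer_instance

-- ===== CLAIM (what is proved, stated in full; the proofs are below) =====
def Claim_equal_categorize_factor_py : Prop := ∀ (factor_name : String), Dom_categorize_factor_py factor_name → Spec_categorize_factor_py factor_name (categorize_factor_py factor_name)

-- ===== LEMMAS AND PROOFS =====

-- the ranks found at start position i (proof-side view of B's inner loop)
def hitsAt (s : List Char) (i : Nat) : List Nat :=
  (List.range' (i + 4) 8).filterMap (fun j => PySem.Dict.get? kwRank (String.ofList ((s.drop i).take (j - i))))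

-- all ranks found by B's scan
def allHits (s : List Char) : List Nat :=
  (List.range s.length).flatMap (hitsAt s)

-- the keyword group of each rank (A's branch order)
def groupWords : Nat → List String
  | 0 => ["trust", "confidence", "reliability"]
  | 1 => ["energy", "consumption", "efficiency"]
  | 2 => ["time", "duration", "processing"]
  | 3 => ["ethics", "compliance", "moral"]
  | 4 => ["input", "data", "information"]
  | _ => []

-- B's inner loop is a running min over the ranks the dictionary returns
theorem foldl_match_min {ι : Type} (h : ι → Option Nat) (l : List ι) (b : Nat) :
    l.foldl (fun b x => match h x with | some r => if r < b then r else b | none => b) b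
      = (l.filterMap h).foldl min b := by
  induction l generalizing b with
  | nil => rfl
  | cons x t ih =>
      cases hx : h x with
      | none => simp [hx, ih]
      | some r =>
          simp only [List.foldl_cons, List.filterMap_cons, hx, ih]
          congr 1
          rw [Nat.min_def]; split_ifs <;> omega

-- a fold of running-min folds is one running min over the concatenation
theorem foldl_foldl_min {ι : Type} (g : ι → List Nat) (l : List ι) (b : Nat) :
    l.foldl (fun b i => (g i).foldl min b) b = (l.flatMap g).foldl min b := by
  induction l generalizing b with
  | nil => rfl
  | cons x t ih => simp [List.flatMap_cons, List.foldl_append, ih]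

-- nesting B's running-min loops over the whole scan collects all dictionary hits
theorem foldl_scan_eq (h : Nat → Nat → Option Nat) (l : List Nat) (b : Nat) :
    l.foldl (fun b i => (List.range' (i + 4) 8).foldl
        (fun b j => match h i j with | some r => if r < b then r else b | none => b) b) b
      = (l.flatMap (fun i => (List.range' (i + 4) 8).filterMap (h i))).foldl min b := by
  simp only [foldl_match_min]
  exact foldl_foldl_min (fun i => (List.range' (i + 4) 8).filterMap (h i)) l b

theorem alt_eq_getD (factor_name : String) :
    categorize_factor_py_alt factor_name
      = categoriesB.getD ((allHits (PySem.Chars.lower factor_name.toList)).foldl min 5) "Other" :=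
  congrArg (fun x => categoriesB.getD x "Other")
    (foldl_scan_eq
      (fun i j => PySem.Dict.get? kwRank
        (String.ofList (((PySem.Chars.lower factor_name.toList).drop i).take (j - i))))
      (List.range (PySem.Chars.lower factor_name.toList).length) 5)

-- every rank B finds comes from a keyword of that rank occurring in the text
theorem mem_allHits_elim {s : List Char} {r : Nat} (h : r ∈ allHits s) :
    ∃ kw : String, PySem.Dict.get? kwRank kw = some r ∧ kw.toList <:+: s := by
  rcases List.mem_flatMap.mp h with ⟨i, -, hr⟩
  rcases List.mem_filterMap.mp hr with ⟨j, -, hget⟩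
  refine ⟨String.ofList ((s.drop i).take (j - i)), hget, ?_⟩
  rw [String.toList_ofList]
  exact (List.take_prefix _ _).isInfix.trans (List.drop_suffix i s).isInfix

-- every keyword of length 4..11 occurring in the text is found by B's scan
theorem mem_allHits_intro {s : List Char} (kw : String) (r : Nat)
    (hget : PySem.Dict.get? kwRank kw = some r)
    (hlo : 4 ≤ kw.toList.length) (hhi : kw.toList.length ≤ 11)
    (hinf : kw.toList <:+: s) : r ∈ allHits s := by
  rcases hinf with ⟨t, u, hs⟩
  have hdrop : s.drop t.length = kw.toList ++ u := by
    rw [← hs, List.append_assoc, List.drop_left]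
  have htake : (s.drop t.length).take kw.toList.length = kw.toList := by
    rw [hdrop, List.take_left]
  have hlen : s.length = t.length + kw.toList.length + u.length := by
    rw [← hs]; simp; omega
  refine List.mem_flatMap.mpr ⟨t.length, List.mem_range.mpr (by omega), ?_⟩
  refine List.mem_filterMap.mpr ⟨t.length + kw.toList.length, List.mem_range'_1.mpr (by omega), ?_⟩
  have : t.length + kw.toList.length - t.length = kw.toList.length := by omega
  rw [this, htake, String.ofList_toList]
  exact hget

-- the dictionary's content, read off from a successful lookup
theorem get?_kwRank_elim {kw : String} {r : Nat} (h : PySem.Dict.get? kwRank kw = some r) :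
    r ≤ 4 ∧ kw ∈ groupWords r := by
  have hi : kwRank.items =
    [("trust", 0), ("confidence", 0), ("reliability", 0),
     ("energy", 1), ("consumption", 1), ("efficiency", 1),
     ("time", 2), ("duration", 2), ("processing", 2),
     ("ethics", 3), ("compliance", 3), ("moral", 3),
     ("input", 4), ("data", 4), ("information", 4)] := rfl
  unfold PySem.Dict.get? at h
  rcases Option.map_eq_some_iff.mp h with ⟨p, hfind, hp2⟩
  have hp1 : p.1 = kw := by
    have := List.find?_some hfind
    simpa [beq_iff_eq] using this
  have hmem : p ∈ kwRank.items := List.mem_of_find?_eq_some hfind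
  rw [hi] at hmem
  have hpkw : p = (kw, r) := by rw [← hp1, ← hp2]
  subst hpkw
  simp only [List.mem_cons, List.not_mem_nil, or_false, Prod.mk.injEq] at hmem
  rcases hmem with ⟨h1, h2⟩|⟨h1, h2⟩|⟨h1, h2⟩|⟨h1, h2⟩|⟨h1, h2⟩|⟨h1, h2⟩|⟨h1, h2⟩|⟨h1, h2⟩|⟨h1, h2⟩|⟨h1, h2⟩|⟨h1, h2⟩|⟨h1, h2⟩|⟨h1, h2⟩|⟨h1, h2⟩|⟨h1, h2⟩ <;>
    subst h1 <;> subst h2 <;> simp [groupWords]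

-- rank r is found by B's scan iff A's group-r 'any' test fires (r ≤ 4)
theorem mem_allHits_iff (factor_name : String) (r : Nat) (hr : r ≤ 4) :
    r ∈ allHits (PySem.Chars.lower factor_name.toList)
      ↔ (groupWords r).any (fun word => PySem.Str.isIn word (PySem.Str.lower factor_name)) = true := by
  constructor
  · intro h
    rcases mem_allHits_elim h with ⟨kw, hget, hinf⟩
    rcases get?_kwRank_elim hget with ⟨-, hmem⟩
    refine List.any_eq_true.mpr ⟨kw, hmem, ?_⟩
    rw [PySem.Str.isIn_iff_infix, PySem.Str.toList_lower]
    exact hinf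
  · intro h
    rcases List.any_eq_true.mp h with ⟨kw, hmem, hin⟩
    rw [PySem.Str.isIn_iff_infix, PySem.Str.toList_lower] at hin
    interval_cases r <;>
      simp only [groupWords, List.mem_cons, List.not_mem_nil, or_false] at hmem <;>
      rcases hmem with h1|h1|h1 <;> subst h1 <;>
      exact mem_allHits_intro _ _ (by decide) (by decide) (by decide) hin

-- ===== VERDICT (by name: the statement is the Claim_ definition above) =====
theorem categorize_factor_py_spec : Claim_equal_categorize_factor_py := by
  intro factor_name _
  unfold Spec_categorize_factor_py
  rw [alt_eq_getD]
  unfold categorize_factor_py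
  dsimp only
  set s := PySem.Chars.lower factor_name.toList with hs
  set L := allHits s with hL
  have hle := PySem.List.foldl_min_le L 5
  have hmem := PySem.List.foldl_min_mem L 5
  set b := L.foldl min 5 with hb
  have hiff : ∀ r : Nat, r ≤ 4 →
      (r ∈ L ↔ (groupWords r).any (fun word => PySem.Str.isIn word (PySem.Str.lower factor_name)) = true) :=
    fun r hr => mem_allHits_iff factor_name r hr
  have hbL : b ≠ 5 → b ∈ L := fun hne => hmem.resolve_left hne
  have hLrank : ∀ r ∈ L, r ≤ 4 := by
    intro r hrL
    rcases mem_allHits_elim hrL with ⟨kw, hget, -⟩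
    exact (get?_kwRank_elim hget).1
  by_cases h0 : (["trust", "confidence", "reliability"].any (fun word => PySem.Str.isIn word (PySem.Str.lower factor_name))) = true
  · have : b ≤ 0 := hle.2 0 ((hiff 0 (by omega)).mpr (by simpa [groupWords] using h0))
    have hb0 : b = 0 := by omega
    rw [if_pos h0, hb0]; rfl
  rw [if_neg h0]
  by_cases h1 : (["energy", "consumption", "efficiency"].any (fun word => PySem.Str.isIn word (PySem.Str.lower factor_name))) = true
  · have hble : b ≤ 1 := hle.2 1 ((hiff 1 (by omega)).mpr (by simpa [groupWords] using h1))
    have hbne : b ≠ 0 := fun hb0 =>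
      h0 (by simpa [groupWords] using (hiff 0 (by omega)).mp (hb0 ▸ hbL (by omega)))
    have hb1 : b = 1 := by omega
    rw [if_pos h1, hb1]; rfl
  rw [if_neg h1]
  by_cases h2 : (["time", "duration", "processing"].any (fun word => PySem.Str.isIn word (PySem.Str.lower factor_name))) = true
  · have hble : b ≤ 2 := hle.2 2 ((hiff 2 (by omega)).mpr (by simpa [groupWords] using h2))
    have hbne0 : b ≠ 0 := fun e =>
      h0 (by simpa [groupWords] using (hiff 0 (by omega)).mp (e ▸ hbL (by omega)))
    have hbne1 : b ≠ 1 := fun e =>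
      h1 (by simpa [groupWords] using (hiff 1 (by omega)).mp (e ▸ hbL (by omega)))
    have hb2 : b = 2 := by omega
    rw [if_pos h2, hb2]; rfl
  rw [if_neg h2]
  by_cases h3 : (["ethics", "compliance", "moral"].any (fun word => PySem.Str.isIn word (PySem.Str.lower factor_name))) = true
  · have hble : b ≤ 3 := hle.2 3 ((hiff 3 (by omega)).mpr (by simpa [groupWords] using h3))
    have hbne0 : b ≠ 0 := fun e =>
      h0 (by simpa [groupWords] using (hiff 0 (by omega)).mp (e ▸ hbL (by omega)))
    have hbne1 : b ≠ 1 := fun e =>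
      h1 (by simpa [groupWords] using (hiff 1 (by omega)).mp (e ▸ hbL (by omega)))
    have hbne2 : b ≠ 2 := fun e =>
      h2 (by simpa [groupWords] using (hiff 2 (by omega)).mp (e ▸ hbL (by omega)))
    have hb3 : b = 3 := by omega
    rw [if_pos h3, hb3]; rfl
  rw [if_neg h3]
  by_cases h4 : (["input", "data", "information"].any (fun word => PySem.Str.isIn word (PySem.Str.lower factor_name))) = true
  · have hble : b ≤ 4 := hle.2 4 ((hiff 4 (by omega)).mpr (by simpa [groupWords] using h4))
    have hbne0 : b ≠ 0 := fun e =>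
      h0 (by simpa [groupWords] using (hiff 0 (by omega)).mp (e ▸ hbL (by omega)))
    have hbne1 : b ≠ 1 := fun e =>
      h1 (by simpa [groupWords] using (hiff 1 (by omega)).mp (e ▸ hbL (by omega)))
    have hbne2 : b ≠ 2 := fun e =>
      h2 (by simpa [groupWords] using (hiff 2 (by omega)).mp (e ▸ hbL (by omega)))
    have hbne3 : b ≠ 3 := fun e =>
      h3 (by simpa [groupWords] using (hiff 3 (by omega)).mp (e ▸ hbL (by omega)))
    have hb4 : b = 4 := by omega
    rw [if_pos h4, hb4]; rfl
  rw [if_neg h4]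
  have hb5 : b = 5 := by
    by_contra hne
    have hbL' := hbL hne
    have hb4 : b ≤ 4 := hLrank b hbL'
    have hfire := (hiff b hb4).mp hbL'
    interval_cases b <;> simp_all [groupWords]
  rw [hb5]; rfl
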